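-- pv_equiv track=rewrite | github.com/kaljuvee/incident-analysis | utils/analysis_util.py | categorize_incident
-- ===== SOURCE A (Python) =====
-- def normalize_string(s):
--     return s.lower().strip().strip("'\"")
--
-- def categorize_incident(text, incident_types):
--     normalized_text = normalize_string(text)
--
--     # Check for exact matches first
--     for incident_type in incident_types:
--         if normalize_string(incident_type) in normalized_text:
--             return incident_type
--
--     # If no exact match, look for partial matches
--     for incident_type in incident_types:
--         words = normalize_string(incident_type).split()
--         if all(word in normalized_text for word in words):
--             return incident_type
--
--     # If still no match, look for any word match
--     for incident_type in incident_types: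
--         words = normalize_string(incident_type).split()
--         if any(word in normalized_text for word in words):
--             return incident_type
--
--     return 'Unknown'
-- ===== SOURCE B (Python) =====
-- def normalize_string(s):
--     return s.lower().strip().strip("'\"")
--
-- def categorize_incident(text, incident_types):
--     normalized_text = normalize_string(text)
--
--     def tier(incident_type):
--         nt = normalize_string(incident_type)
--         if nt in normalized_text:
--             return 0
--         words = nt.split()
--         if all(word in normalized_text for word in words):
--             return 1
--         if any(word in normalized_text for word in words):
--             return 2
--         return 3
--
--     best, best_tier = 'Unknown', 3
--     for t in incident_types:
--         k = tier(t)
--         if k < best_tier: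
--             if k == 0:
--                 return t
--             best, best_tier = t, k
--     return best
-- ===== Notes on version B (the rewrite author's own statement) =====
-- stated objective: alternative
-- what changed: Replaces A's three sequential full scans (exact / all-words / any-word) by a single pass that assigns each type a match tier (0-3) and keeps the first type with the strictly smallest tier, normalizing each type once instead of up to three times.
import Mathlib
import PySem

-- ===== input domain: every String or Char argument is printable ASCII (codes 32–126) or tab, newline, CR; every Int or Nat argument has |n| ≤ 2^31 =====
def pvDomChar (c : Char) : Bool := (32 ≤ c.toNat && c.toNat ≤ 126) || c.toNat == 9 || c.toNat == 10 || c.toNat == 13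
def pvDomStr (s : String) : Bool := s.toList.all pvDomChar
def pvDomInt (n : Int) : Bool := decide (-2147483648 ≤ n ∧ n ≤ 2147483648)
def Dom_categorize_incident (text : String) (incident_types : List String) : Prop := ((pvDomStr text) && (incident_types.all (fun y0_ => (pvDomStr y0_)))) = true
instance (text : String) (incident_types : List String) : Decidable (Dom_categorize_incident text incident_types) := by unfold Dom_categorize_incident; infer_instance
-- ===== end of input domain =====

-- B replaces A's three sequential scans by one pass tracking the best match tier (alternative decomposition, same results).

-- ===== PORT A =====
-- helper normalize_string (shared by both Pythons)
def pvNormalize (s : String) : String :=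
  PySem.Str.stripChars (PySem.Str.strip (PySem.Str.lower s)) "'\""

-- A's first loop: exact (substring) match
def pvLoop1 (ntext : String) : List String → Option String
  | [] => none
  | t :: rest =>
      if PySem.Str.isIn (pvNormalize t) ntext then some t else pvLoop1 ntext rest

-- A's second loop: all words match
def pvLoop2 (ntext : String) : List String → Option String
  | [] => none
  | t :: rest =>
      if (PySem.Str.split₀ (pvNormalize t)).all (fun w => PySem.Str.isIn w ntext) then some t
      else pvLoop2 ntext rest

-- A's third loop: any word matches
def pvLoop3 (ntext : String) : List String → Option String
  | [] => none
  | t :: rest =>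
      if (PySem.Str.split₀ (pvNormalize t)).any (fun w => PySem.Str.isIn w ntext) then some t
      else pvLoop3 ntext rest

def categorize_incident (text : String) (incident_types : List String) : String :=
  let ntext := pvNormalize text
  (((pvLoop1 ntext incident_types).orElse fun _ =>
    (pvLoop2 ntext incident_types).orElse fun _ =>
      pvLoop3 ntext incident_types)).getD "Unknown"

-- ===== PORT B =====
-- B's tier of a single incident type against the normalized text
def pvTier (ntext t : String) : Nat :=
  let nt := pvNormalize t
  if PySem.Str.isIn nt ntext then 0
  else
    let words := PySem.Str.split₀ nt
    if words.all (fun w => PySem.Str.isIn w ntext) then 1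
    else if words.any (fun w => PySem.Str.isIn w ntext) then 2
    else 3

-- B's single pass: keep first type with strictly smallest tier, early return on tier 0
def pvBest (ntext : String) : List String → String → Nat → String
  | [], best, _ => best
  | t :: rest, best, bt =>
      let k := pvTier ntext t
      if k < bt then
        (if k = 0 then t else pvBest ntext rest t k)
      else pvBest ntext rest best bt

def categorize_incident_alt (text : String) (incident_types : List String) : String :=
  pvBest (pvNormalize text) incident_types "Unknown" 3

-- ===== PRECONDITION & SPEC =====
def Spec_categorize_incident (text : String) (incident_types : List String) (out : String) : Prop := out = categorize_incident_alt text incident_types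
instance (text : String) (incident_types : List String) (out : String) : Decidable (Spec_categorize_incident text incident_types out) := by unfold Spec_categorize_incident; infer_instance

-- ===== CLAIM (what is proved, stated in full; the proofs are below) =====
def Claim_equal_categorize_incident : Prop := ∀ (text : String) (incident_types : List String), Dom_categorize_incident text incident_types → Spec_categorize_incident text incident_types (categorize_incident text incident_types)

-- ===== LEMMAS AND PROOFS =====

theorem pvBest_one (ntext : String) (l : List String) (best : String) :
    pvBest ntext l best 1 = (pvLoop1 ntext l).getD best := by
  induction l generalizing best with
  | nil => rfl
  | cons t rest ih =>
      simp only [pvBest, pvLoop1, pvTier]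
      split_ifs with h1 h2 h3 <;>
        first
          | (exfalso; omega)
          | (simp; done)
          | (simp [ih]; done)

theorem pvBest_two (ntext : String) (l : List String) (best : String) :
    pvBest ntext l best 2 = ((pvLoop1 ntext l).orElse fun _ => pvLoop2 ntext l).getD best := by
  induction l generalizing best with
  | nil => rfl
  | cons t rest ih =>
      simp only [pvBest, pvLoop1, pvLoop2, pvTier]
      split_ifs with h1 h2 h3 <;>
        first
          | (exfalso; omega)
          | (simp [Option.orElse]; done)
          | (simp [Option.orElse, ih]; done)
          | ((cases hl : pvLoop1 ntext rest <;> simp [Option.orElse, hl, pvBest_one]); done)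

theorem pvBest_three (ntext : String) (l : List String) (best : String) :
    pvBest ntext l best 3 =
      (((pvLoop1 ntext l).orElse fun _ =>
        (pvLoop2 ntext l).orElse fun _ => pvLoop3 ntext l)).getD best := by
  induction l generalizing best with
  | nil => rfl
  | cons t rest ih =>
      simp only [pvBest, pvLoop1, pvLoop2, pvLoop3, pvTier]
      split_ifs with h1 h2 h3 <;>
        first
          | (exfalso; omega)
          | (simp [Option.orElse]; done)
          | (simp [Option.orElse, ih]; done)
          | ((cases hl : pvLoop1 ntext rest <;> simp [Option.orElse, hl, pvBest_one]); done)
          | ((cases hl : pvLoop1 ntext rest <;> cases hl2 : pvLoop2 ntext rest <;>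
              simp [Option.orElse, hl, hl2, pvBest_two]); done)

-- ===== VERDICT (by name: the statement is the Claim_ definition above) =====
theorem categorize_incident_spec : Claim_equal_categorize_incident := by
  intro text incident_types _
  show categorize_incident text incident_types = categorize_incident_alt text incident_types
  simp [categorize_incident, categorize_incident_alt, pvBest_three]
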